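-- pv_equiv track=rewrite | github.com/keing1/advent-of-code-2020 | day_17/conway_cubes.py | pad_flat_input_4d
-- ===== SOURCE A (Python) =====
-- def pad_flat_input(cube_input, padding_num):
-- 	num_rows = len(cube_input)
-- 	num_cols = len(cube_input[0])
--
-- 	updated_input_rows = [(['.'] * padding_num + inp_row + ['.'] * padding_num)
-- 		for inp_row in cube_input]
--
-- 	input_plane = [['.' for col in range(num_cols + 2*padding_num)]
-- 		for row in range(padding_num)] + updated_input_rows + \
-- 		[['.' for col in range(num_cols + 2*padding_num)]
-- 		for row in range(padding_num)]
--
-- 	final_space = [[['.'] * (2 * padding_num + num_cols)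
-- 		for r in range(2*padding_num+num_rows)] for p in range(padding_num)] + \
-- 		[input_plane] + \
-- 		[[['.'] * (2 * padding_num + num_cols)
-- 		for r in range(2*padding_num+num_rows)] for p in range(padding_num)]
--
-- 	return final_space
--
-- def pad_flat_input_4d(cube_input, padding_num):
-- 	num_rows = len(cube_input)
-- 	num_cols = len(cube_input[0])
--
-- 	padded_3d_space = pad_flat_input(cube_input, padding_num)
--
-- 	final_4d_space = [[[['.'] * (2*padding_num+num_cols)
-- 		for r in range(2*padding_num+num_rows)] for z in range(2*padding_num+1)]
-- 		for w in range(padding_num)] + \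
-- 		[padded_3d_space] + \
-- 		[[[['.'] * (2*padding_num+num_cols)
-- 		for r in range(2*padding_num+num_rows)] for z in range(2*padding_num+1)]
-- 		for w in range(padding_num)]
--
-- 	return final_4d_space
-- ===== SOURCE B (Python) =====
-- def pad_flat_input_4d(cube_input, padding_num):
--     p = padding_num
--     num_rows = len(cube_input)
--     num_cols = len(cube_input[0])
--     # allocate one uniform blank 4D space, every list freshly built
--     space = [[[['.'] * (2 * p + num_cols) for _ in range(2 * p + num_rows)]
--               for _ in range(2 * p + 1)]
--              for _ in range(2 * p + 1)]
--     # overwrite the centre data rows (fresh concatenations, keeps ragged row lengths)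
--     for i, row in enumerate(cube_input):
--         space[p][p][p + i] = ['.'] * p + row + ['.'] * p
--     return space
-- ===== Notes on version B (the rewrite author's own statement) =====
-- stated objective: simpler
-- what changed: B allocates one uniform blank 4D grid in a single comprehension and then overwrites the centre data rows in place, replacing A's axis-by-axis concatenation of padding blocks (and its 3D helper) with an allocate-then-fill pass.
-- outside the precondition, e.g. on pad_flat_input_4d([['#']], -1): A returns [[[['#']]]], B raises IndexError
import Mathlib
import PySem

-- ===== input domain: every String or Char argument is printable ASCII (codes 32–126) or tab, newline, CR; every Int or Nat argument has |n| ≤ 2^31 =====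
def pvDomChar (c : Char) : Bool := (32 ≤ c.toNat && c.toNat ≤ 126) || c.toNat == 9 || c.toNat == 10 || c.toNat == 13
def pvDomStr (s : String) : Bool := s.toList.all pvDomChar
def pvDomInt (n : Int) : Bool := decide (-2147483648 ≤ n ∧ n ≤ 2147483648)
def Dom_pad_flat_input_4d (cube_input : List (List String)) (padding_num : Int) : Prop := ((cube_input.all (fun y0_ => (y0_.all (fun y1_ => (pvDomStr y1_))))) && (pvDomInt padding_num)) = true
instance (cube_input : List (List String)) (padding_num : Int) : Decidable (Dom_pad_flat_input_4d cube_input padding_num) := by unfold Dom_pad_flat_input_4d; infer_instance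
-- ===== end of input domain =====

-- B replaces A's axis-by-axis concatenation of padding blocks (and its 3D helper) with one
-- uniform blank allocation followed by overwriting the centre data rows (objective: simpler).

-- ===== PORT A =====
-- helper of A: pad_flat_input (the 3D padding), transliterated
def pad_flat_input (cube_input : List (List String)) (padding_num : Int) : List (List (List String)) :=
  let num_rows : Int := cube_input.length
  -- cube_input[0]: IndexError on empty input (excluded by Pre_); default [] stands for the raise
  let num_cols : Int := (PySem.List.pyGetD cube_input 0 []).length
  let updated_input_rows : List (List String) :=
    cube_input.map (fun inp_row =>
      PySem.List.pyRepeat ["."] padding_num ++ inp_row ++ PySem.List.pyRepeat ["."] padding_num)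
  let input_plane : List (List String) :=
    (PySem.List.pyRange 0 padding_num 1).map (fun _ =>
      (PySem.List.pyRange 0 (num_cols + 2*padding_num) 1).map (fun _ => ".")) ++
    updated_input_rows ++
    (PySem.List.pyRange 0 padding_num 1).map (fun _ =>
      (PySem.List.pyRange 0 (num_cols + 2*padding_num) 1).map (fun _ => "."))
  let final_space : List (List (List String)) :=
    (PySem.List.pyRange 0 padding_num 1).map (fun _ =>
      (PySem.List.pyRange 0 (2*padding_num + num_rows) 1).map (fun _ =>
        PySem.List.pyRepeat ["."] (2*padding_num + num_cols))) ++
    [input_plane] ++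
    (PySem.List.pyRange 0 padding_num 1).map (fun _ =>
      (PySem.List.pyRange 0 (2*padding_num + num_rows) 1).map (fun _ =>
        PySem.List.pyRepeat ["."] (2*padding_num + num_cols)))
  final_space

def pad_flat_input_4d (cube_input : List (List String)) (padding_num : Int) : List (List (List (List String))) :=
  let num_rows : Int := cube_input.length
  let num_cols : Int := (PySem.List.pyGetD cube_input 0 []).length
  let padded_3d_space := pad_flat_input cube_input padding_num
  let final_4d_space : List (List (List (List String))) :=
    (PySem.List.pyRange 0 padding_num 1).map (fun _ =>
      (PySem.List.pyRange 0 (2*padding_num + 1) 1).map (fun _ =>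
        (PySem.List.pyRange 0 (2*padding_num + num_rows) 1).map (fun _ =>
          PySem.List.pyRepeat ["."] (2*padding_num + num_cols)))) ++
    [padded_3d_space] ++
    (PySem.List.pyRange 0 padding_num 1).map (fun _ =>
      (PySem.List.pyRange 0 (2*padding_num + 1) 1).map (fun _ =>
        (PySem.List.pyRange 0 (2*padding_num + num_rows) 1).map (fun _ =>
          PySem.List.pyRepeat ["."] (2*padding_num + num_cols))))
  final_4d_space

-- ===== PORT B =====
def pad_flat_input_4d_alt (cube_input : List (List String)) (padding_num : Int) : List (List (List (List String))) :=
  let p : Int := padding_num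
  let num_rows : Int := cube_input.length
  -- cube_input[0]: IndexError on empty input (excluded by Pre_); default [] stands for the raise
  let num_cols : Int := (PySem.List.pyGetD cube_input 0 []).length
  let space : List (List (List (List String))) :=
    (PySem.List.pyRange 0 (2*p + 1) 1).map (fun _ =>
      (PySem.List.pyRange 0 (2*p + 1) 1).map (fun _ =>
        (PySem.List.pyRange 0 (2*p + num_rows) 1).map (fun _ =>
          PySem.List.pyRepeat ["."] (2*p + num_cols))))
  -- for i, row in enumerate(cube_input): space[p][p][p+i] = ['.']*p + row + ['.']*p
  -- (pySetD/pyGetD are exact in range; out of range Python raises IndexError, excluded by Pre_)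
  (PySem.List.enumerate cube_input 0).foldl (fun sp ir =>
    PySem.List.pySetD sp p (PySem.List.pySetD (PySem.List.pyGetD sp p []) p
      (PySem.List.pySetD (PySem.List.pyGetD (PySem.List.pyGetD sp p []) p []) (p + ir.1)
        (PySem.List.pyRepeat ["."] p ++ ir.2 ++ PySem.List.pyRepeat ["."] p)))) space

-- ===== PRECONDITION & SPEC =====
-- Pre_ excludes (a) empty cube_input, where A raises IndexError on cube_input[0], and
-- (b) negative padding_num, where B's centre write raises IndexError on its empty
-- allocation while A's range()-built axes silently collapse to length 1 with no padding
-- (an accident of range/list-multiplication on negative counts).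
def Pre_pad_flat_input_4d (cube_input : List (List String)) (padding_num : Int) : Prop :=
  cube_input ≠ [] ∧ 0 ≤ padding_num
instance (cube_input : List (List String)) (padding_num : Int) : Decidable (Pre_pad_flat_input_4d cube_input padding_num) := by unfold Pre_pad_flat_input_4d; infer_instance

def pvWitness_pad_flat_input_4d : List (List String) × Int := ([["#", "."], [".", "#"]], 1)

def Spec_pad_flat_input_4d (cube_input : List (List String)) (padding_num : Int) (out : List (List (List (List String)))) : Prop := out = pad_flat_input_4d_alt cube_input padding_num
instance (cube_input : List (List String)) (padding_num : Int) (out : List (List (List (List String)))) : Decidable (Spec_pad_flat_input_4d cube_input padding_num out) := by unfold Spec_pad_flat_input_4d; infer_instance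

-- ===== CLAIM (what is proved, stated in full; the proofs are below) =====
def Claim_equal_pad_flat_input_4d : Prop := ∀ (cube_input : List (List String)) (padding_num : Int), Dom_pad_flat_input_4d cube_input padding_num → Pre_pad_flat_input_4d cube_input padding_num → Spec_pad_flat_input_4d cube_input padding_num (pad_flat_input_4d cube_input padding_num)

-- ===== LEMMAS AND PROOFS =====

-- a constant comprehension over range(e) is a replicate
theorem pv_map_const_pyRange {α : Type} (e : Int) (c : α) :
    (PySem.List.pyRange 0 e 1).map (fun _ => c) = List.replicate e.toNat c := by
  rw [PySem.List.pyRange_one]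
  simp [Function.comp_def, List.map_const']

-- setting at the length of a prefix
theorem pv_set_append {α : Type} (pre rest : List α) (y : α) :
    (pre ++ rest).set pre.length y = pre ++ rest.set 0 y := by
  induction pre with
  | nil => rfl
  | cons a t ih => simp [ih]

-- setting index a of a (a+1+a)-replicate splits it
theorem pv_set_replicate {α : Type} (a : Nat) (x y : α) :
    (List.replicate (a + 1 + a) x).set a y =
      List.replicate a x ++ y :: List.replicate a x := by
  have h : a + 1 + a = a + (1 + a) := by omega
  rw [h, List.replicate_add]
  have h2 := pv_set_append (List.replicate a x) (List.replicate (1 + a) x) y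
  rw [List.length_replicate] at h2
  rw [h2]
  have h3 : 1 + a = a + 1 := by omega
  rw [h3, List.replicate_succ]
  rfl

-- getD after set at the same (in-range) index
theorem pv_getD_set_self {α : Type} (l : List α) (n : Nat) (a d : α) (h : n < l.length) :
    (l.set n a).getD n d = a := by
  rw [List.getD_eq_getElem _ _ (by simpa using h)]
  simp

-- setting an in-range index to the element already there
theorem pv_set_getD_self {α : Type} (l : List α) (n : Nat) (d : α) (_h : n < l.length) :
    l.set n (l.getD n d) = l := by
  apply List.ext_getElem (by simp)
  intro i h1 h2
  rw [List.getElem_set]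
  split
  · subst_eqs; rw [List.getD_eq_getElem _ _ h2]
  · rfl

-- the inner row-writing fold fills the centre rows
theorem pv_inner_fold (m : Nat) (f : List String → List String) (blank : List String) :
    ∀ (rows : List (List String)) (s : Nat) (pre post : List (List String)),
      pre.length = m + s →
      (PySem.List.enumerate rows (s : Int)).foldl
          (fun plane ir => PySem.List.pySetD plane ((m : Int) + ir.1) (f ir.2))
          (pre ++ List.replicate rows.length blank ++ post) =
        pre ++ rows.map f ++ post := by
  intro rows
  induction rows with
  | nil => intro s pre post _; simp [PySem.List.enumerate_nil]
  | cons r rows ih =>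
    intro s pre post hpre
    rw [PySem.List.enumerate_cons]
    simp only [List.foldl_cons, List.length_cons, List.replicate_succ, List.cons_append,
      List.map_cons, List.append_assoc]
    have hidx : (m : Int) + (s : Int) = ((pre.length : Nat) : Int) := by
      rw [hpre]; push_cast; ring
    rw [hidx, PySem.List.pySetD_natCast]
    have hset := pv_set_append pre (blank :: (List.replicate rows.length blank ++ post)) (f r)
    rw [List.set_cons_zero] at hset
    rw [hset]
    have hs1 : ((s : Int) + 1) = (((s + 1 : Nat)) : Int) := by push_cast; ring
    have h2 := ih (s + 1) (pre ++ [f r]) post (by simp [hpre]; omega)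
    simp only [List.append_assoc, List.cons_append] at h2
    rw [hs1]
    exact h2

-- the 4D fold factors through the single cell at index (m, m)
theorem pv_outer_fold (m : Nat) (u : List (List String) → Int × List String → List (List String)) :
    ∀ (L : List (Int × List String)) (space : List (List (List (List String)))),
      m < space.length →
      m < (PySem.List.pyGetD space (m : Int) []).length →
      L.foldl (fun sp ir =>
          PySem.List.pySetD sp (m : Int) (PySem.List.pySetD (PySem.List.pyGetD sp (m : Int) []) (m : Int)
            (u (PySem.List.pyGetD (PySem.List.pyGetD sp (m : Int) []) (m : Int) []) ir))) space =
        PySem.List.pySetD space (m : Int) (PySem.List.pySetD (PySem.List.pyGetD space (m : Int) []) (m : Int)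
          (L.foldl u (PySem.List.pyGetD (PySem.List.pyGetD space (m : Int) []) (m : Int) []))) := by
  intro L
  induction L with
  | nil =>
    intro space h1 h2
    have h2' : m < (space.getD m ([] : List (List (List String)))).length := by
      simpa using h2
    simp only [List.foldl_nil, PySem.List.pySetD_natCast, PySem.List.pyGetD_natCast]
    rw [pv_set_getD_self _ _ _ h2', pv_set_getD_self _ _ _ h1]
  | cons ir L ih =>
    intro space h1 h2
    have h2' : m < (space.getD m ([] : List (List (List String)))).length := by
      simpa using h2
    simp only [List.foldl_cons, PySem.List.pySetD_natCast, PySem.List.pyGetD_natCast] at ih ⊢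
    rw [ih]
    · rw [pv_getD_set_self _ _ _ _ h1, pv_getD_set_self _ _ _ _ h2', List.set_set, List.set_set]
    · simpa using h1
    · rw [pv_getD_set_self _ _ _ _ h1]
      simpa using h2'

theorem pad_flat_input_4d_eq (cube_input : List (List String)) (padding_num : Int)
    (hp : 0 ≤ padding_num) :
    pad_flat_input_4d cube_input padding_num = pad_flat_input_4d_alt cube_input padding_num := by
  obtain ⟨m, rfl⟩ := Int.eq_ofNat_of_zero_le hp
  have hrep : ∀ e : Int, PySem.List.pyRepeat ["."] e = List.replicate e.toNat "." := by
    intro e; rw [PySem.List.pyRepeat_singleton]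
  -- abbreviations
  set nr := cube_input.length with hnr
  set nc := (PySem.List.pyGetD cube_input 0 ([] : List String)).length with hnc
  have t1 : (2 * (m : Int) + (nc : Int)).toNat = 2 * m + nc := by omega
  have t2 : ((nc : Int) + 2 * (m : Int)).toNat = 2 * m + nc := by omega
  have t3 : (2 * (m : Int) + (nr : Int)).toNat = 2 * m + nr := by omega
  have t4 : (2 * (m : Int) + 1).toNat = 2 * m + 1 := by omega
  have t5 : ((m : Int)).toNat = m := by omega
  set blank : List String := List.replicate (2 * m + nc) "." with hblank
  set P : List (List String) := List.replicate (2 * m + nr) blank with hP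
  set f : List String → List String :=
    fun row => List.replicate m "." ++ row ++ List.replicate m "." with hf
  -- the A side in closed form
  have hA : pad_flat_input_4d cube_input (m : Int) =
      List.replicate m (List.replicate (2 * m + 1) P) ++
        (List.replicate m P ++
          (List.replicate m blank ++ cube_input.map f ++ List.replicate m blank) ::
            List.replicate m P) ::
          List.replicate m (List.replicate (2 * m + 1) P) := by
    simp only [pad_flat_input_4d, pad_flat_input, pv_map_const_pyRange, hrep,
      t1, t2, t3, t4, t5, ← hnr, ← hnc, ← hblank, ← hP, ← hf]
    simp [Nat.add_comm]
  -- the B side: evaluate the allocation, then the two fold lemmas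
  have hB : pad_flat_input_4d_alt cube_input (m : Int) =
      List.replicate m (List.replicate (2 * m + 1) P) ++
        (List.replicate m P ++
          (List.replicate m blank ++ cube_input.map f ++ List.replicate m blank) ::
            List.replicate m P) ::
          List.replicate m (List.replicate (2 * m + 1) P) := by
    simp only [pad_flat_input_4d_alt, pv_map_const_pyRange, hrep,
      t1, t3, t4, t5, ← hnr, ← hnc, ← hblank, ← hP]
    rw [pv_outer_fold m
      (fun plane ir => PySem.List.pySetD plane ((m : Int) + ir.1) (f ir.2))
      (PySem.List.enumerate cube_input 0)
      (List.replicate (2 * m + 1) (List.replicate (2 * m + 1) P))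
      (by simp; omega)
      (by simp only [PySem.List.pyGetD_natCast]
          rw [List.getD_eq_getElem _ _ (by simp; omega)]
          simp; omega)]
    simp only [PySem.List.pySetD_natCast, PySem.List.pyGetD_natCast]
    rw [List.getD_eq_getElem _ _ (by simp; omega), List.getElem_replicate,
        List.getD_eq_getElem _ _ (by simp; omega), List.getElem_replicate]
    have hsplit : (2 * m + nr) = m + nr + m := by omega
    have hP' : P = List.replicate m blank ++ List.replicate nr blank ++ List.replicate m blank := by
      rw [hP, hsplit, List.replicate_add, List.replicate_add]
    have hfold := pv_inner_fold m f blank cube_input 0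
      (List.replicate m blank) (List.replicate m blank) (by simp)
    rw [Nat.cast_zero, ← hnr] at hfold
    rw [hP', hfold]
    have h21 : 2 * m + 1 = m + 1 + m := by omega
    rw [h21, pv_set_replicate, pv_set_replicate, ← h21]
  rw [hA, hB]

-- ===== VERDICT (by name: the statement is the Claim_ definition above) =====
theorem pad_flat_input_4d_spec : Claim_equal_pad_flat_input_4d := by
  intro cube_input padding_num _ hpre
  exact pad_flat_input_4d_eq cube_input padding_num hpre.2
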